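-- pv_equiv track=rewrite | github.com/Junjie-Ye/CCTU | data/check_code/70/check_constraint_0.py | _strip_terminal_period_for_format
-- ===== SOURCE A (Python) =====
-- def _strip_terminal_period_for_format(text: str) -> str:
--     """
--     For table detection only: remove the final sentence-ending period '.'
--     (optionally followed by closing quotes/brackets), so that patterns like
--     '| ... |.' won't break table parsing. Do NOT use this for punctuation validation.
--     """
--     if not text:
--         return text
--
--     # keep consistent with punctuation logic if desired
--     closers = set(')"\']}>»”’)】')
--
--     # Strip trailing whitespace (but remember it)
--     end_ws_len = 0
--     i = len(text) - 1
--     while i >= 0 and text[i].isspace():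
--         end_ws_len += 1
--         i -= 1
--     if i < 0:
--         return text
--
--     # Skip closing punctuation (for cases like .") etc.)
--     j = i
--     while j >= 0 and text[j] in closers:
--         j -= 1
--
--     # If the last meaningful punctuation is a period, remove it
--     if j >= 0 and text[j] == '.':
--         # remove that '.' at position j, keep the rest (including closers and trailing ws)
--         return text[:j] + text[j+1:]
--
--     return text
-- ===== SOURCE B (Python) =====
-- CLOSERS = ')"\']}>»”’)】'
--
--
-- def _strip_terminal_period_for_format(text: str) -> str:
--     """Single forward pass: a state machine tracks the position of the last '.'
--     whose suffix so far is closers* then whitespace*; delete that period at the end."""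
--     cand = None
--     after_ws = False
--     for k, c in enumerate(text):
--         if c == '.':
--             cand, after_ws = k, False
--         elif cand is not None:
--             if c.isspace():
--                 after_ws = True
--             elif c in CLOSERS and not after_ws:
--                 pass
--             else:
--                 cand = None
--     if cand is None:
--         return text
--     return text[:cand] + text[cand + 1:]
-- ===== Notes on version B (the rewrite author's own statement) =====
-- stated objective: alternative
-- what changed: Replaces A's staged backward scans (strip trailing whitespace, skip closers, test for a period) with a single forward enumerate pass whose two-field state machine tracks the position of the last period whose suffix so far is closers then whitespace, deleting that position at the end.
import Mathlib
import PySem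

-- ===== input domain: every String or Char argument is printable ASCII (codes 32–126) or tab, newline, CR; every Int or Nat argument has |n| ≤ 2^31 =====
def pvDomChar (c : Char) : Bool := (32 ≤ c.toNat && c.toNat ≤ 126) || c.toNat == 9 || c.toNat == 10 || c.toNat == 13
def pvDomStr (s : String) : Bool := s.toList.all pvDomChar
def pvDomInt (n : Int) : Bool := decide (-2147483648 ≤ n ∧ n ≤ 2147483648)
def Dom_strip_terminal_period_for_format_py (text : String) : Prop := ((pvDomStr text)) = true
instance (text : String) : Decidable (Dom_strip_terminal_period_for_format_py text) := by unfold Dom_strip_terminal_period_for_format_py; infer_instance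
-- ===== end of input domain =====

-- B replaces A's staged backward scans (ws, then closers, then period test) with a single forward pass whose state machine tracks the last period followed only by closers then whitespace (alternative decomposition, same cost).


-- ===== PORT A =====
-- the closers string of A (B's module constant CLOSERS is the same literal)
def pvClosersChars : List Char := ")\"']}>»”’)】".toList

-- A's backward while loop 'while i >= 0 and p(text[i]): i -= 1', returning the final i
def pvScanA (s : List Char) (p : Char → Bool) (i : Int) : Int :=
  if _h : 0 ≤ i then
    match PySem.List.pyGet? s i with
    | some c => if p c then pvScanA s p (i - 1) else i
    | none => i
  else i
termination_by (i + 1).toNat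
decreasing_by omega

def strip_terminal_period_for_format_py (text : String) : String :=
  let s := text.toList
  if s = [] then text
  else
    let closers := PySem.Set.ofList pvClosersChars
    let i := pvScanA s PySem.Chars.isspace ((s.length : Int) - 1)
    if i < 0 then text
    else
      let j := pvScanA s (fun c => closers.contains c) i
      if 0 ≤ j ∧ PySem.List.pyGet? s j = some '.' then
        String.ofList (PySem.List.slice s none (some j) ++ PySem.List.slice s (some (j + 1)) none)
      else text

-- ===== PORT B =====
-- one step of Source B's loop body; state = (cand, after_ws), kc = (k, c) from enumerate
def pvStepB (st : Option Int × Bool) (kc : Int × Char) : Option Int × Bool :=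
  if kc.2 = '.' then (some kc.1, false)
  else
    match st.1 with
    | none => st
    | some _ =>
      if PySem.Chars.isspace kc.2 then (st.1, true)
      else if pvClosersChars.contains kc.2 && !st.2 then st
      else (none, st.2)

def strip_terminal_period_for_format_py_alt (text : String) : String :=
  let s := text.toList
  let st := (PySem.List.enumerate s 0).foldl pvStepB (none, false)
  match st.1 with
  | none => text
  | some k => String.ofList (PySem.List.slice s none (some k) ++ PySem.List.slice s (some (k + 1)) none)

-- ===== PRECONDITION & SPEC =====
def Spec_strip_terminal_period_for_format_py (text : String) (out : String) : Prop := out = strip_terminal_period_for_format_py_alt text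
instance (text : String) (out : String) : Decidable (Spec_strip_terminal_period_for_format_py text out) := by unfold Spec_strip_terminal_period_for_format_py; infer_instance

-- ===== CLAIM (what is proved, stated in full; the proofs are below) =====
def Claim_equal_strip_terminal_period_for_format_py : Prop := ∀ (text : String), Dom_strip_terminal_period_for_format_py text → Spec_strip_terminal_period_for_format_py text (strip_terminal_period_for_format_py text)

-- ===== LEMMAS AND PROOFS =====

-- the last meaningful chars of a (reversed) prefix r: drop trailing ws, then trailing closers
def pvV (r : List Char) : List Char :=
  (r.dropWhile PySem.Chars.isspace).dropWhile (fun c => pvClosersChars.contains c)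

-- the candidate period position B's state machine should hold after a prefix with reverse r
def pvCand (r : List Char) : Option Int :=
  if (pvV r).head? = some '.' then some (((pvV r).length : Int) - 1) else none

-- every closer is non-whitespace (finite check)
theorem pvClosers_not_ws : ∀ c ∈ pvClosersChars, PySem.Chars.isspace c = false := by
  have h : pvClosersChars.all (fun c => PySem.Chars.isspace c == false) = true := by decide
  intro c hc
  simpa using List.all_eq_true.mp h c hc

theorem pvDropWhile_cases (p : Char → Bool) (r : List Char) :
    r.dropWhile p = r ∨ (∃ a r2, r = a :: r2 ∧ p a = true ∧ (r.dropWhile p).length < r.length) := by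
  cases r with
  | nil => left; rfl
  | cons a r2 =>
    by_cases hp : p a = true
    · right
      refine ⟨a, r2, rfl, hp, ?_⟩
      rw [List.dropWhile_cons, if_pos hp]
      have := List.length_dropWhile_le p r2
      simp only [List.length_cons]; omega
    · left; rw [List.dropWhile_cons, if_neg hp]

-- B's loop invariant: after processing prefix t, the state's candidate is pvCand t.reverse and,
-- when it is set, after_ws records whether t has trailing whitespace
theorem pvStepB_inv (t : List Char) :
    ((PySem.List.enumerate t 0).foldl pvStepB (none, false)).1 = pvCand t.reverse ∧
    (pvCand t.reverse ≠ none →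
      ((PySem.List.enumerate t 0).foldl pvStepB (none, false)).2
        = decide ((t.reverse.dropWhile PySem.Chars.isspace).length ≠ t.length)) := by
  induction t using List.reverseRecOn with
  | nil => simp [PySem.List.enumerate, pvCand, pvV]
  | append_singleton t c ih =>
    obtain ⟨ih1, ih2⟩ := ih
    set st := (PySem.List.enumerate t 0).foldl pvStepB (none, false) with hst
    have hfold : (PySem.List.enumerate (t ++ [c]) 0).foldl pvStepB (none, false)
        = pvStepB st ((0 : Int) + t.length, c) := by
      rw [PySem.List.enumerate_append, List.foldl_append, hst]
      simp [PySem.List.enumerate]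
    rw [hfold, List.reverse_append, List.reverse_singleton, List.singleton_append]
    set r := t.reverse with hr
    have hrlen : r.length = t.length := by simp [hr]
    by_cases hdot : c = '.'
    · subst hdot
      have hws : PySem.Chars.isspace '.' = false := by decide
      have hcl : ('.' ∈ pvClosersChars) = False := by simp; decide
      have hv : pvV ('.' :: r) = '.' :: r := by
        rw [pvV, List.dropWhile_cons, if_neg (by simp [hws]),
          List.dropWhile_cons, if_neg (by simp [hcl])]
      constructor
      · simp [pvStepB, pvCand, hv, hrlen]
      · intro _
        have hwd : (('.' : Char) :: r).dropWhile PySem.Chars.isspace = '.' :: r := by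
          simp [hws]
        rw [hwd]
        simp [pvStepB, hrlen]
    · by_cases hws : PySem.Chars.isspace c = true
      · -- whitespace char: w and v unchanged
        have hwc : (c :: r).dropWhile PySem.Chars.isspace = r.dropWhile PySem.Chars.isspace := by
          rw [List.dropWhile_cons, if_pos hws]
        have hvc : pvV (c :: r) = pvV r := by rw [pvV, hwc]; rfl
        have hcc : pvCand (c :: r) = pvCand r := by rw [pvCand, pvCand, hvc]
        cases hc1 : st.1 with
        | none =>
          refine ⟨by simp [pvStepB, hdot, hcc, ← ih1, hc1], ?_⟩
          intro h
          rw [hcc] at h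
          exact absurd (ih1 ▸ hc1) h
        | some k =>
          refine ⟨by simp [pvStepB, hdot, hws, hcc, ← ih1, hc1], ?_⟩
          intro _
          have hle := List.length_dropWhile_le PySem.Chars.isspace r
          rw [hwc]
          simp [pvStepB, hdot, hc1, hws]
          omega
      · -- non-ws, non-period char
        have hwsf : PySem.Chars.isspace c = false := by simpa using hws
        have hwc : (c :: r).dropWhile PySem.Chars.isspace = c :: r := by
          rw [List.dropWhile_cons, if_neg (by simp [hwsf])]
        by_cases hcl : c ∈ pvClosersChars
        · -- closer
          have hclb : pvClosersChars.contains c = true := by simpa using hcl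
          have hvc : pvV (c :: r) = r.dropWhile (fun x => pvClosersChars.contains x) := by
            rw [pvV, hwc, List.dropWhile_cons, if_pos hclb]
          cases hc1 : st.1 with
          | none =>
            -- cand stays none; must show pvCand (c :: r) = none
            have hnone : pvCand r = none := by rw [← ih1, hc1]
            have hcc : pvCand (c :: r) = none := by
              rcases pvDropWhile_cases PySem.Chars.isspace r with heq | ⟨a, r2, hra, hpa, _⟩
              · -- r has no leading ws: v' = v
                have hveq : pvV (c :: r) = pvV r := by rw [hvc, pvV, heq]
                rw [pvCand] at hnone ⊢
                rw [hveq]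
                exact hnone
              · -- r starts with ws a: dropping closers stops at a
                have hacl : a ∉ pvClosersChars := by
                  intro hmem
                  rw [pvClosers_not_ws a hmem] at hpa; exact absurd hpa (by simp)
                have hveq : pvV (c :: r) = r := by
                  rw [hvc, hra, List.dropWhile_cons, if_neg (by simp [hacl]), ← hra]
                rw [pvCand, hveq, hra]
                rw [if_neg]
                simp only [List.head?_cons]
                intro hcon
                have : PySem.Chars.isspace a = true := hpa
                rw [Option.some.inj hcon] at this
                exact absurd this (by decide)
            refine ⟨by simp [pvStepB, hdot, hc1, hcc], ?_⟩
            intro h; exact absurd hcc h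
          | some k =>
            have hsomeR : pvCand r ≠ none := by rw [← ih1, hc1]; simp
            have haw := ih2 hsomeR
            by_cases hb : st.2 = true
            · -- after_ws set: cand invalidated; r starts with ws
              have hneq : (r.dropWhile PySem.Chars.isspace).length ≠ t.length := by
                by_contra hcon
                rw [haw] at hb; simp at hb; exact hb hcon
              obtain ⟨a, r2, hra, hpa, -⟩ :
                  ∃ a r2, r = a :: r2 ∧ PySem.Chars.isspace a = true ∧
                    (r.dropWhile PySem.Chars.isspace).length < r.length := by
                rcases pvDropWhile_cases PySem.Chars.isspace r with heq | h
                · exact absurd (by rw [heq, hrlen]) hneq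
                · exact h
              have hacl : a ∉ pvClosersChars := by
                intro hmem
                rw [pvClosers_not_ws a hmem] at hpa; exact absurd hpa (by simp)
              have hveq : pvV (c :: r) = r := by
                rw [hvc, hra, List.dropWhile_cons, if_neg (by simp [hacl]), ← hra]
              have hcc : pvCand (c :: r) = none := by
                rw [pvCand, hveq, hra]
                rw [if_neg]
                simp only [List.head?_cons]
                intro hcon
                have : PySem.Chars.isspace a = true := hpa
                rw [Option.some.inj hcon] at this
                exact absurd this (by decide)
              refine ⟨?_, fun h => absurd hcc h⟩
              simp [pvStepB, hdot, hc1, hwsf, hcl, hb, hcc]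
            · -- after_ws clear: r has no leading ws; cand kept
              have hbf : st.2 = false := by simpa using hb
              have hweq : r.dropWhile PySem.Chars.isspace = r := by
                rw [hbf] at haw
                have hlen : (r.dropWhile PySem.Chars.isspace).length = t.length := by
                  by_contra hcon
                  simp [hcon] at haw
                rcases pvDropWhile_cases PySem.Chars.isspace r with heq | ⟨_, _, _, _, hlt⟩
                · exact heq
                · rw [hlen, hrlen] at hlt; omega
              have hvv : pvV (c :: r) = pvV r := by
                rw [hvc, pvV, hweq]
              have hcc : pvCand (c :: r) = pvCand r := by rw [pvCand, pvCand, hvv]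
              refine ⟨?_, ?_⟩
              · simp [pvStepB, hdot, hwsf, hcl, hbf, hcc, ← ih1, hc1]
              · intro _
                have hlen2 : (c :: r).length = (t ++ [c]).length := by simp [hrlen]
                rw [hwc, hlen2]
                simp [pvStepB, hdot, hc1, hwsf, hcl, hbf]
        · -- plain char: cand invalidated (or stays none)
          have hclb : pvClosersChars.contains c = false := by simpa using hcl
          have hvc : pvV (c :: r) = c :: r := by
            rw [pvV, hwc, List.dropWhile_cons, if_neg (by simp [hcl])]
          have hcc : pvCand (c :: r) = none := by
            rw [pvCand, hvc]
            rw [if_neg]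
            simp only [List.head?_cons]
            intro hcon
            exact hdot (Option.some.inj hcon)
          cases hc1 : st.1 with
          | none =>
            exact ⟨by simp [pvStepB, hdot, hc1, hcc], fun h => absurd hcc h⟩
          | some k =>
            exact ⟨by simp [pvStepB, hdot, hc1, hwsf, hcl, hcc], fun h => absurd hcc h⟩

-- A's backward scan stopped at index i reads: over the prefix s.take (i+1),
-- the result is (length of the reversed prefix with its leading p-run dropped) - 1
theorem pvScanA_spec (s : List Char) (p : Char → Bool) :
    ∀ (n : Nat) (i : Int), i + 1 = n → -1 ≤ i → i < s.length →
      pvScanA s p i = (((s.take (i + 1).toNat).reverse.dropWhile p).length : Int) - 1 := by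
  intro n
  induction n with
  | zero =>
    intro i h1 h2 _
    have hi : i = -1 := by omega
    subst hi
    rw [pvScanA]
    norm_num
  | succ k ih =>
    intro i h1 h2 hlen
    have hi0 : 0 ≤ i := by omega
    have hlt : i.toNat < s.length := by omega
    have hget : PySem.List.pyGet? s i = some s[i.toNat] := by
      simp [PySem.List.pyGet?, PySem.List.pyIdx?, hi0, hlen]
    have htake : s.take (i + 1).toNat = s.take i.toNat ++ [s[i.toNat]] := by
      have : (i + 1).toNat = i.toNat + 1 := by omega
      rw [this, List.take_add_one, List.getElem?_eq_getElem hlt]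
      rfl
    rw [pvScanA, dif_pos hi0, hget]
    by_cases hp : p s[i.toNat]
    · simp only [htake, List.reverse_append, List.reverse_singleton,
        List.singleton_append, List.dropWhile_cons, hp, if_true]
      rw [ih (i - 1) (by omega) (by omega) (by omega),
        show ((i:Int) - 1 + 1).toNat = i.toNat from by omega]
    · simp only [if_false, htake, List.reverse_append, List.reverse_singleton,
        List.singleton_append, List.dropWhile_cons, hp, Bool.false_eq_true]
      simp only [List.length_cons, List.length_reverse, List.length_take]
      omega

theorem pvSuffix_reverse_take {l r : List Char} (h : l <:+ r) :
    l.reverse = r.reverse.take l.length := by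
  obtain ⟨t, rfl⟩ := h
  rw [List.reverse_append, ← List.length_reverse (as := l)]
  exact (List.take_left ..).symm

theorem pvContains_ofList (L : List Char) (c : Char) :
    (PySem.Set.ofList L).contains c = L.contains c := by
  simp [PySem.Set.mem_ofList]

theorem strip_spec_aux (text : String) :
    strip_terminal_period_for_format_py text = strip_terminal_period_for_format_py_alt text := by
  simp only [strip_terminal_period_for_format_py, strip_terminal_period_for_format_py_alt]
  set s := text.toList with hs
  obtain ⟨hB1, -⟩ := pvStepB_inv s
  rw [hB1]
  have hrev : s.reverse.reverse = s := by simp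
  by_cases hnil : s = []
  · simp [hnil, pvCand, pvV]
  · rw [if_neg hnil]
    have hlen1 : 1 ≤ s.length := List.length_pos_of_ne_nil hnil
    set w := s.reverse.dropWhile PySem.Chars.isspace with hw
    have hwlen : w.length ≤ s.length := by
      have := List.length_dropWhile_le (p := PySem.Chars.isspace) (l := s.reverse)
      simpa using this
    have hi : pvScanA s PySem.Chars.isspace ((s.length : Int) - 1) = (w.length : Int) - 1 := by
      rw [pvScanA_spec s _ s.length _ (by omega) (by omega) (by omega),
        show ((s.length : Int) - 1 + 1).toNat = s.length from by omega,
        List.take_length]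
    rw [hi]
    have hQ : (fun c => (PySem.Set.ofList pvClosersChars).contains c)
        = (fun c => pvClosersChars.contains c) := by
      funext c; exact pvContains_ofList _ c
    set v := w.dropWhile (fun c => pvClosersChars.contains c) with hv
    have hvV : pvV s.reverse = v := rfl
    have hvw : v <:+ w := List.dropWhile_suffix _
    have hws : w <:+ s.reverse := List.dropWhile_suffix _
    have hvs : v <:+ s.reverse := hvw.trans hws
    have hvrev : v.reverse = s.take v.length := by
      have := pvSuffix_reverse_take hvs; simpa using this
    have hvlen : v.length ≤ w.length := hv ▸ List.length_dropWhile_le _ _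
    by_cases hwnil : w = []
    · have hv0 : v = [] := by rw [hv, hwnil]; rfl
      rw [if_pos (by simp [hwnil] : ((w.length : Int) - 1) < 0)]
      simp [pvCand, hvV, hv0]
    · have hwpos : 1 ≤ w.length := List.length_pos_of_ne_nil hwnil
      rw [if_neg (by omega : ¬ ((w.length : Int) - 1) < 0)]
      have hwrev : w.reverse = s.take w.length := by
        have := pvSuffix_reverse_take hws; simpa using this
      have hj : pvScanA s (fun c => (PySem.Set.ofList pvClosersChars).contains c)
          ((w.length : Int) - 1) = (v.length : Int) - 1 := by
        rw [hQ, pvScanA_spec s _ w.length _ (by omega) (by omega) (by omega),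
          show ((w.length : Int) - 1 + 1).toNat = w.length from by omega,
          ← hwrev, List.reverse_reverse, ← hv]
      rw [hj]
      by_cases hvnil : v = []
      · have : pvCand s.reverse = none := by simp [pvCand, hvV, hvnil]
        rw [this]
        rw [if_neg (by rintro ⟨h0, -⟩; simp [hvnil] at h0)]
      · obtain ⟨c, v', hvc⟩ := List.exists_cons_of_ne_nil hvnil
        have hvpos : 1 ≤ v.length := List.length_pos_of_ne_nil hvnil
        have hvlt : v.length - 1 < s.length := by omega
        have hvls : v.length ≤ s.length := by omega
        have hget : PySem.List.pyGet? s ((v.length : Int) - 1) = some s[v.length - 1] := by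
          simp [PySem.List.pyGet?, PySem.List.pyIdx?, hvpos, hvls,
            List.getElem?_eq_getElem hvlt]
        have hlast : s[v.length - 1] = c := by
          have h1 : s[v.length - 1]? = some c := by
            rw [← List.getElem?_take_of_lt (j := v.length) (by omega), ← hvrev, hvc,
              List.reverse_cons,
              show (c :: v').length - 1 = v'.reverse.length from by simp]
            exact List.getElem?_concat_length
          rw [List.getElem?_eq_getElem hvlt] at h1
          exact Option.some.inj h1
        have hcond : (0 ≤ (v.length : Int) - 1 ∧
            PySem.List.pyGet? s ((v.length : Int) - 1) = some '.')
            ↔ c = '.' := by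
          rw [hget]
          constructor
          · rintro ⟨-, h⟩
            injection h with h'; rw [← hlast, h']
          · intro h
            exact ⟨by omega, by rw [hlast, h]⟩
        by_cases hc : c = '.'
        · rw [if_pos (hcond.mpr hc)]
          have : pvCand s.reverse = some ((v.length : Int) - 1) := by
            simp [pvCand, hvV, hvc, hc]
          rw [this]
        · rw [if_neg (fun hA => hc (hcond.mp hA))]
          have : pvCand s.reverse = none := by
            rw [pvCand, hvV, hvc]
            rw [if_neg]
            simp only [List.head?_cons]
            intro hcon
            exact hc (Option.some.inj hcon)
          rw [this]

-- ===== VERDICT (by name: the statement is the Claim_ definition above) =====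
theorem strip_terminal_period_for_format_py_spec : Claim_equal_strip_terminal_period_for_format_py := by
  intro text _
  exact strip_spec_aux text
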